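-- pv_equiv track=rewrite | github.com/MicrochipTech/mdfu-saleae-analyzers | LWFTPResponseAnalyzer/HighLevelAnalyzer.py | checksum16
-- ===== SOURCE A (Python) =====
-- def checksum16(byteArray):
--
--     localByteArray = byteArray[:]
--
--     numBytes = len(localByteArray)
--     if (numBytes % 2) == 1:
--         localByteArray.append(0)
--         numBytes = len(localByteArray)
--
--     checksum = 0
--
--     for i in range(0, int(numBytes/2)):
--         startInd = i*2
--         endInd   = startInd + 2
--         curr16bits = int.from_bytes(localByteArray[startInd:endInd], byteorder='little')
--         checksum = checksum + curr16bits
--         if checksum > 65535: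
--             checksum = checksum - 65536
--
--     return checksum
-- ===== SOURCE B (Python) =====
-- def checksum16(byteArray):
--     localByteArray = byteArray[:]
--     if len(localByteArray) % 2 == 1:
--         localByteArray.append(0)
--     low = sum(localByteArray[0::2])
--     high = sum(localByteArray[1::2])
--     return (low + 256 * high) % 65536
-- ===== Notes on version B (the rewrite author's own statement) =====
-- stated objective: simpler
-- what changed: Replaced the indexed pair loop with per-step carry-correction by two strided sums (even-index and odd-index bytes) combined once with a single final % 65536.
import Mathlib
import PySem

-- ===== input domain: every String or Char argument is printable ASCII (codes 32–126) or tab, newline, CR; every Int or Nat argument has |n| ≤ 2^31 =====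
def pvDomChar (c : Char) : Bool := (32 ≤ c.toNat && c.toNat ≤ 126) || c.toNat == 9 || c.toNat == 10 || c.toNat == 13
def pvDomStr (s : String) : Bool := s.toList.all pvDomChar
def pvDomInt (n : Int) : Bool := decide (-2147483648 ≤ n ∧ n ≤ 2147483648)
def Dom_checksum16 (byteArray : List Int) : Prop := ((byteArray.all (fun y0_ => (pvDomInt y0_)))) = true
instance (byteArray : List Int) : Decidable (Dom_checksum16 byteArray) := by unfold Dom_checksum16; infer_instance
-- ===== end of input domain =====

-- B differs from A by structure: two strided sums and one final % 65536 instead of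
-- a per-pair carry-correcting fold (objective: simpler; return values proved equal on Pre_).

-- ===== PORT A =====
-- int.from_bytes(l, byteorder='little'): exact for byte values 0..255 (guaranteed by Pre_)
def pvFromBytesLE (l : List Int) : Int := l.foldr (fun b acc => b + 256 * acc) 0

def checksum16 (byteArray : List Int) : Int :=
  let localByteArray := byteArray                               -- byteArray[:]
  let numBytes : Int := localByteArray.length
  let localByteArray :=
    if numBytes % 2 = 1 then localByteArray ++ [0] else localByteArray
  let numBytes : Int := localByteArray.length
  (PySem.List.pyRange 0 (PySem.Int.floordiv numBytes 2) 1).foldl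
    (fun checksum i =>
      let startInd := i * 2
      let endInd := startInd + 2
      let curr16bits :=
        pvFromBytesLE (PySem.List.slice localByteArray (some startInd) (some endInd))
      let checksum := checksum + curr16bits
      if checksum > 65535 then checksum - 65536 else checksum) 0

-- ===== PORT B =====
-- hand port of the step-2 slices xs[0::2] / xs[1::2] (exact: every second element,
-- starting from the head of the list the slice starts in)
def pvStride2 : List Int → List Int
  | [] => []
  | [a] => [a]
  | a :: _ :: rest => a :: pvStride2 rest

def checksum16_alt (byteArray : List Int) : Int :=
  let localByteArray := byteArray
  let localByteArray :=
    if (localByteArray.length : Int) % 2 = 1 then localByteArray ++ [0] else localByteArray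
  let low := (pvStride2 localByteArray).sum                     -- sum(localByteArray[0::2])
  let high := (pvStride2 (localByteArray.drop 1)).sum           -- sum(localByteArray[1::2])
  PySem.Int.mod (low + 256 * high) 65536

-- ===== PRECONDITION & SPEC =====
-- Pre_ excludes lists with an element outside 0..255, on which A's int.from_bytes raises ValueError.
def Pre_checksum16 (byteArray : List Int) : Prop :=
  ∀ b ∈ byteArray, 0 ≤ b ∧ b < 256
instance (byteArray : List Int) : Decidable (Pre_checksum16 byteArray) := by
  unfold Pre_checksum16; infer_instance

def pvWitness_checksum16 : List Int := [17, 250, 3]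

def Spec_checksum16 (byteArray : List Int) (out : Int) : Prop := out = checksum16_alt byteArray
instance (byteArray : List Int) (out : Int) : Decidable (Spec_checksum16 byteArray out) := by unfold Spec_checksum16; infer_instance

-- ===== CLAIM (what is proved, stated in full; the proofs are below) =====
def Claim_equal_checksum16 : Prop := ∀ (byteArray : List Int), Dom_checksum16 byteArray → Pre_checksum16 byteArray → Spec_checksum16 byteArray (checksum16 byteArray)

-- ===== LEMMAS AND PROOFS =====

-- the 16-bit word starting at byte 2*k of L
def pvWord (L : List Int) (k : Nat) : Int := pvFromBytesLE ((L.drop (2 * k)).take 2)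

theorem pvWord_bounds (L : List Int) (hL : ∀ b ∈ L, 0 ≤ b ∧ b < 256) (k : Nat) :
    0 ≤ pvWord L k ∧ pvWord L k < 65536 := by
  have hsub : ∀ b ∈ (L.drop (2 * k)).take 2, 0 ≤ b ∧ b < 256 := by
    intro b hb
    exact hL b (List.mem_of_mem_drop (List.mem_of_mem_take hb))
  have hlen : ((L.drop (2 * k)).take 2).length ≤ 2 := by
    simp
  unfold pvWord
  rcases hs : (L.drop (2 * k)).take 2 with _ | ⟨a, _ | ⟨b, t⟩⟩
  · simp [pvFromBytesLE]
  · have ha := hsub a (by simp [hs])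
    simp [pvFromBytesLE]; omega
  · have ht : t = [] := by
      rw [hs] at hlen; simp at hlen; exact hlen
    subst ht
    have ha := hsub a (by simp [hs])
    have hb' := hsub b (by simp [hs])
    simp [pvFromBytesLE]; omega

theorem pvWord_cons_cons (a b : Int) (R : List Int) (k : Nat) :
    pvWord (a :: b :: R) (k + 1) = pvWord R k := by
  unfold pvWord
  have : 2 * (k + 1) = (2 * k) + 1 + 1 := by omega
  rw [this]
  simp

theorem pvStride2_cons (x : Int) (xs : List Int) :
    pvStride2 (x :: xs) = x :: pvStride2 (xs.drop 1) := by
  cases xs with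
  | nil => simp [pvStride2]
  | cons y ys => simp [pvStride2]

-- the sum of all 16-bit words of an even-length list equals low + 256*high
theorem pvSum_words :
    ∀ (L : List Int), L.length % 2 = 0 →
      ((List.range (L.length / 2)).map (pvWord L)).sum
        = (pvStride2 L).sum + 256 * (pvStride2 (L.drop 1)).sum
  | [], _ => by simp [pvStride2]
  | [a], h => by simp at h
  | a :: b :: R, h => by
    have hR : R.length % 2 = 0 := by simp only [List.length_cons] at h; omega
    have ih := pvSum_words R hR
    have hlen : (a :: b :: R).length / 2 = R.length / 2 + 1 := by
      simp only [List.length_cons]; omega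
    rw [hlen, List.range_succ_eq_map]
    simp only [List.map_cons, List.map_map, List.sum_cons]
    have hw0 : pvWord (a :: b :: R) 0 = a + 256 * b := by
      simp [pvWord, pvFromBytesLE]
    have hmap : (List.range (R.length / 2)).map ((pvWord (a :: b :: R)) ∘ Nat.succ)
        = (List.range (R.length / 2)).map (pvWord R) := by
      apply List.map_congr_left
      intro k _
      simpa using pvWord_cons_cons a b R k
    rw [hw0, hmap, ih]
    rw [show pvStride2 (a :: b :: R) = a :: pvStride2 R by simp [pvStride2]]
    rw [show ((a :: b :: R).drop 1) = b :: R by simp]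
    rw [pvStride2_cons b R]
    simp; ring

-- A's fold over the first m pairs computes the word sum mod 65536
theorem pvFoldA (L : List Int) (hL : ∀ b ∈ L, 0 ≤ b ∧ b < 256) :
    ∀ m : Nat,
      ((List.range m).foldl
        (fun checksum k =>
          let curr := pvWord L k
          let c := checksum + curr
          if c > 65535 then c - 65536 else c) 0)
        = ((List.range m).map (pvWord L)).sum % 65536 := by
  intro m
  induction m with
  | zero => simp
  | succ n ih =>
    rw [List.range_succ, List.foldl_append, List.map_append]
    simp only [List.foldl_cons, List.foldl_nil, List.map_cons, List.map_nil,
      List.sum_append, List.sum_cons, List.sum_nil]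
    rw [ih]
    have hw := pvWord_bounds L hL n
    have hmod : 0 ≤ ((List.range n).map (pvWord L)).sum % 65536 ∧
        ((List.range n).map (pvWord L)).sum % 65536 < 65536 := by
      constructor
      · exact Int.emod_nonneg _ (by norm_num)
      · exact Int.emod_lt_of_pos _ (by norm_num)
    omega

-- rewrite A's pyRange fold (with its slices) into the Nat-indexed fold over pvWord
theorem pvA_eq_fold (L : List Int) (hL : L.length % 2 = 0) :
    (PySem.List.pyRange 0 (PySem.Int.floordiv (L.length : Int) 2) 1).foldl
      (fun checksum i =>
        let startInd := i * 2
        let endInd := startInd + 2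
        let curr := pvFromBytesLE (PySem.List.slice L (some startInd) (some endInd))
        let c := checksum + curr
        if c > 65535 then c - 65536 else c) 0
    = ((List.range (L.length / 2)).foldl
        (fun checksum k =>
          let curr := pvWord L k
          let c := checksum + curr
          if c > 65535 then c - 65536 else c) 0) := by
  have hfd : PySem.Int.floordiv (L.length : Int) 2 = ((L.length / 2 : Nat) : Int) := by
    exact_mod_cast PySem.Int.floordiv_natCast L.length 2
  rw [hfd, PySem.List.pyRange_one]
  have htn : (((L.length / 2 : Nat) : Int) - 0).toNat = L.length / 2 := by omega
  rw [htn, List.foldl_map]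
  refine PySem.List.foldl_congr_mem _ _ _ _ ?_
  intro c k hk
  have hcast : (0 : Int) + (k : Int) = ((k : Nat) : Int) := by omega
  rw [hcast]
  have hslice : PySem.List.slice L (some (((k : Nat) : Int) * 2))
      (some (((k : Nat) : Int) * 2 + 2)) = (L.drop (2 * k)).take 2 := by
    have h1 : ((k : Nat) : Int) * 2 = ((2 * k : Nat) : Int) := by push_cast; ring
    have h2 : ((k : Nat) : Int) * 2 + 2 = ((2 * k + 2 : Nat) : Int) := by push_cast; ring
    rw [h2, h1, PySem.List.slice_natCast]
    congr 1
    omega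
  simp only [hslice]
  rfl

-- length parity / padding facts
theorem pvPad_even (xs : List Int) :
    (if (xs.length : Int) % 2 = 1 then xs ++ [0] else xs).length % 2 = 0 := by
  by_cases h : (xs.length : Int) % 2 = 1 <;> simp [h] <;> omega

theorem pvPad_bytes (xs : List Int) (hx : ∀ b ∈ xs, 0 ≤ b ∧ b < 256) :
    ∀ b ∈ (if (xs.length : Int) % 2 = 1 then xs ++ [0] else xs), 0 ≤ b ∧ b < 256 := by
  by_cases h : (xs.length : Int) % 2 = 1 <;> simp [h]
  · intro b hb
    rcases hb with hb | hb
    · exact hx b hb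
    · omega
  · exact hx

-- ===== VERDICT (by name: the statement is the Claim_ definition above) =====
theorem checksum16_spec : Claim_equal_checksum16 := by
  intro byteArray _ hpre
  unfold Spec_checksum16 checksum16 checksum16_alt
  simp only []
  set L := if (byteArray.length : Int) % 2 = 1 then byteArray ++ [0] else byteArray with hLdef
  have hEven : L.length % 2 = 0 := pvPad_even byteArray
  have hBytes : ∀ b ∈ L, 0 ≤ b ∧ b < 256 := pvPad_bytes byteArray hpre
  rw [pvA_eq_fold L hEven, pvFoldA L hBytes (L.length / 2),
    pvSum_words L hEven]
  rw [PySem.Int.mod_eq_emod_of_pos (by norm_num : (0:Int) < 65536)]
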